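-- pv_equiv track=rewrite | github.com/MaryDenyaGoyio/generative-ts | generative_ts/models/ls4.py | _segment_bounds
-- ===== SOURCE A (Python) =====
-- def _segment_bounds(length: int, segments: int):
--     segments = max(1, min(int(segments), length))
--     base = length // segments
--     rem = length % segments
--     bounds = []
--     start = 0
--     for i in range(segments):
--         seg_len = base + (1 if i < rem else 0)
--         end = start + seg_len
--         bounds.append((start, end))
--         start = end
--     return bounds
-- ===== SOURCE B (Python) =====
-- def _segment_bounds(length: int, segments: int):
--     segments = max(1, min(int(segments), length))
--     base, rem = divmod(length, segments)
--     bounds = []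
--     for i in range(segments):
--         start = i * base + min(i, rem)
--         end = (i + 1) * base + min(i + 1, rem)
--         bounds.append((start, end))
--     return bounds
-- ===== Notes on version B (the rewrite author's own statement) =====
-- stated objective: alternative
-- what changed: Replaces the running-start accumulator with a stateless closed form: each bound is computed directly from its index as (i*base + min(i, rem), (i+1)*base + min(i+1, rem)).
import Mathlib
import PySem

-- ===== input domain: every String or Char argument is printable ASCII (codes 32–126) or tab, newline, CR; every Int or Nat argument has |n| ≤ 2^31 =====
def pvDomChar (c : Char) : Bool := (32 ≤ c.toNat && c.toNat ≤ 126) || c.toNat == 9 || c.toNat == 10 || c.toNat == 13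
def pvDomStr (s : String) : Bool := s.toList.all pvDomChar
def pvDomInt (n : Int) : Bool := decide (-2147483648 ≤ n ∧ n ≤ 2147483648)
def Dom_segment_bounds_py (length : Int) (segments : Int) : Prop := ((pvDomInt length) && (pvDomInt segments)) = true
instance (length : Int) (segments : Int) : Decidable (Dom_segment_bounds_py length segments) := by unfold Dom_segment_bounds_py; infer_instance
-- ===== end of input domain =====

-- B computes each bound statelessly from its index instead of threading a running start; same cost.

-- ===== PORT A =====
def segment_bounds_py (length : Int) (segments : Int) : List (Int × Int) :=
  let s := max 1 (min segments length)
  let base := PySem.Int.floordiv length s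
  let rem := PySem.Int.mod length s
  let res := (PySem.List.pyRange 0 s 1).foldl
    (fun (acc : List (Int × Int) × Int) i =>
      let segLen := base + (if i < rem then (1 : Int) else 0)
      let e := acc.2 + segLen
      (acc.1 ++ [(acc.2, e)], e)) ([], 0)
  res.1

-- ===== PORT B =====
def segment_bounds_py_alt (length : Int) (segments : Int) : List (Int × Int) :=
  let s := max 1 (min segments length)
  let base := PySem.Int.floordiv length s
  let rem := PySem.Int.mod length s
  (PySem.List.pyRange 0 s 1).foldl
    (fun acc i => acc ++ [(i * base + min i rem, (i + 1) * base + min (i + 1) rem)]) []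

-- ===== PRECONDITION & SPEC =====
def Spec_segment_bounds_py (length : Int) (segments : Int) (out : List (Int × Int)) : Prop := out = segment_bounds_py_alt length segments
instance (length : Int) (segments : Int) (out : List (Int × Int)) : Decidable (Spec_segment_bounds_py length segments out) := by unfold Spec_segment_bounds_py; infer_instance

-- ===== CLAIM (what is proved, stated in full; the proofs are below) =====
def Claim_equal_segment_bounds_py : Prop := ∀ (length : Int) (segments : Int), Dom_segment_bounds_py length segments → Spec_segment_bounds_py length segments (segment_bounds_py length segments)

-- ===== LEMMAS AND PROOFS =====

-- Invariant: after folding range(0, n), A's accumulator is (B's list, n*base + min n rem).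
theorem segment_bounds_fold_inv (base rem : Int) (hrem : 0 ≤ rem) :
    ∀ n : Int, 0 ≤ n →
      (PySem.List.pyRange 0 n 1).foldl
        (fun (acc : List (Int × Int) × Int) i =>
          let segLen := base + (if i < rem then (1 : Int) else 0)
          let e := acc.2 + segLen
          (acc.1 ++ [(acc.2, e)], e)) ([], 0)
      = ((PySem.List.pyRange 0 n 1).foldl
          (fun acc i => acc ++ [(i * base + min i rem, (i + 1) * base + min (i + 1) rem)]) [],
         n * base + min n rem) := by
  intro n hn
  induction n, hn using Int.le_induction with
  | base =>
    simp [PySem.List.pyRange_one_eq_nil (le_refl (0:Int))]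
    omega
  | succ n hn ih =>
    rw [PySem.List.pyRange_one_succ_right (by omega : (0:Int) ≤ n)]
    rw [List.foldl_append, List.foldl_append, ih]
    simp only [List.foldl_cons, List.foldl_nil]
    have h1 : n * base + min n rem + (base + (if n < rem then (1:Int) else 0))
        = (n + 1) * base + min (n + 1) rem := by
      have hb : (n + 1) * base = n * base + base := by ring
      rw [hb]; split_ifs with h <;> omega
    rw [h1]

-- ===== VERDICT (by name: the statement is the Claim_ definition above) =====
theorem segment_bounds_py_spec : Claim_equal_segment_bounds_py := by
  intro length segments _
  unfold Spec_segment_bounds_py segment_bounds_py segment_bounds_py_alt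
  have hs : (0:Int) < max 1 (min segments length) := by
    have := le_max_left (1:Int) (min segments length); omega
  have hrem : 0 ≤ PySem.Int.mod length (max 1 (min segments length)) := by
    rw [PySem.Int.mod_eq_emod_of_pos hs]
    exact Int.emod_nonneg _ (by omega)
  simp only
  rw [segment_bounds_fold_inv _ _ hrem _ (le_of_lt hs)]
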